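-- pv_equiv track=rewrite | github.com/tOtiana23/Information-security | heming_cipher.py | syndrome_of_codeword
-- ===== SOURCE A (Python) =====
-- from typing import List, Tuple, Dict, Optional
--
-- def syndrome_of_codeword(code: List[int], k: int) -> int:
--     """
--     Compute syndrome (integer) for the received codeword.
--     syndrome = sum( j-th parity mismatch ? 2^(j) : 0 )
--     If syndrome == 0 -> no errors detected.
--     If syndrome != 0 -> that is the 1-based index of incorrect bit.
--     """
--     n = len(code) - 1
--     syn = 0
--     for j in range(k):
--         p = 1 << j
--         s = 0
--         i = p
--         while i <= n:
--             for q in range(i, min(i + p, n + 1)):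
--                 s ^= code[q]
--             i += 2 * p
--         if s != 0:
--             syn |= p
--     return syn  # 0..n
-- ===== SOURCE B (Python) =====
-- def syndrome_of_codeword(code, k):
--     """One-pass over the codeword: for each data index i, fold code[i] into a
--     per-parity-bit XOR accumulator; then assemble the syndrome from the
--     accumulators.  (A instead walks stride-blocks once per parity bit.)"""
--     n = len(code) - 1
--     # number of bits needed to write any index 1..n
--     m = 0
--     p = 1
--     while p <= n:
--         p *= 2
--         m += 1
--     acc = [0] * m  # acc[j] = XOR of code[i] over seen i whose bit j is set (counted only for j < k)
--     for i in range(1, n + 1):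
--         c = code[i]
--         for j in range(m):
--             if j < k and (i // (1 << j)) % 2 == 1:
--                 acc[j] ^= c
--     syn = 0
--     for j in range(m):
--         if acc[j] != 0:
--             syn |= 1 << j
--     return syn
-- ===== Notes on version B (the rewrite author's own statement) =====
-- stated objective: alternative
-- what changed: A walks stride-blocks of indices once per parity bit j (an inner while/for skip-walk); B makes a single pass over the codeword, folding each element into a per-bit XOR accumulator array selected by the bits of its index, then assembles the syndrome from the accumulators.
import Mathlib
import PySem

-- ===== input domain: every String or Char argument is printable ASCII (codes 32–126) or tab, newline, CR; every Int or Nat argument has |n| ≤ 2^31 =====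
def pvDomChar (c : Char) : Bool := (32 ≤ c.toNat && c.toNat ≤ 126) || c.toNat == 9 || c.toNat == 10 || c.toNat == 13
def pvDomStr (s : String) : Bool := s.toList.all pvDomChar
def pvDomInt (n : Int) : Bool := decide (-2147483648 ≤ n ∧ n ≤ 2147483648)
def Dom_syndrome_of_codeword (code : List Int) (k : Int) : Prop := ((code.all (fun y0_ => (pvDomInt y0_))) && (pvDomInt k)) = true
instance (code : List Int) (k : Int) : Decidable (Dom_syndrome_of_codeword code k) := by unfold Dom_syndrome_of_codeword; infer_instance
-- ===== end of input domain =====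

-- B replaces A's per-parity-bit stride-block walks by a single pass over the codeword
-- with a per-bit XOR accumulator array (alternative decomposition, same cost).


-- ===== PORT A =====
-- the inner 'while i <= n: for q in range(i, min(i+p, n+1)): s ^= code[q]; i += 2*p'
-- (hp is only a totality guard; every call site has p = 2^j > 0)
def pyWhileA (code : List Int) (n p : Int) (hp : 0 < p) (i s : Int) : Int :=
  if _h : i ≤ n then
    pyWhileA code n p hp (i + 2 * p)
      ((PySem.List.pyRange i (min (i + p) (n + 1)) 1).foldl
        (fun s q => PySem.Int.bxor s (PySem.List.pyGetD code q 0)) s)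
  else s
termination_by (n + 1 - i).toNat
decreasing_by omega

def syndrome_of_codeword (code : List Int) (k : Int) : Int :=
  let n : Int := (code.length : Int) - 1
  (PySem.List.pyRange 0 k 1).foldl (fun syn j =>
    let p : Int := 2 ^ j.toNat          -- Python '1 << j'; j ≥ 0 since j ∈ range(k)
    let s := pyWhileA code n p (by positivity) p 0
    if s ≠ 0 then PySem.Int.bor syn p else syn) 0

-- ===== PORT B =====
-- 'm = 0; p = 1; while p <= n: p *= 2; m += 1'  (hp is only a totality guard)
def bitLenLoop (n : Int) (p : Int) (hp : 0 < p) (m : Nat) : Nat :=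
  if _h : p ≤ n then bitLenLoop n (p * 2) (by omega) (m + 1) else m
termination_by (n + 1 - p).toNat
decreasing_by omega

-- 'for j in range(m): if j < k and (i // (1 << j)) % 2 == 1: acc[j] ^= c'
-- (acc[j] read as acc.getD j 0: j < m = len(acc) at every call site)
def innerB (k i c : Int) (m : Nat) (acc : List Int) : List Int :=
  (List.range m).foldl (fun acc (j : Nat) =>
    if (j : Int) < k ∧ PySem.Int.mod (PySem.Int.floordiv i ((2 : Int) ^ j)) 2 = 1
    then acc.set j (PySem.Int.bxor (acc.getD j 0) c) else acc) acc

def bitLen (n : Int) : Nat := bitLenLoop n 1 (by omega) 0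

def syndrome_of_codeword_alt (code : List Int) (k : Int) : Int :=
  let n : Int := (code.length : Int) - 1
  let m : Nat := bitLen n
  let acc := (PySem.List.pyRange 1 (n + 1) 1).foldl
      (fun acc i => innerB k i (PySem.List.pyGetD code i 0) m acc)
      (List.replicate m 0)
  (List.range m).foldl (fun syn j =>
    if acc.getD j 0 ≠ 0 then PySem.Int.bor syn ((2 : Int) ^ j) else syn) 0

-- ===== PRECONDITION & SPEC =====
def Spec_syndrome_of_codeword (code : List Int) (k : Int) (out : Int) : Prop := out = syndrome_of_codeword_alt code k
instance (code : List Int) (k : Int) (out : Int) : Decidable (Spec_syndrome_of_codeword code k out) := by unfold Spec_syndrome_of_codeword; infer_instance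

-- ===== CLAIM (what is proved, stated in full; the proofs are below) =====
def Claim_equal_syndrome_of_codeword : Prop := ∀ (code : List Int) (k : Int), Dom_syndrome_of_codeword code k → Spec_syndrome_of_codeword code k (syndrome_of_codeword code k)

-- ===== LEMMAS AND PROOFS =====

-- G code j = XOR of code[q] over q ∈ [1, len) whose bit j is set (both programs compute this per bit)
def G (code : List Int) (j : Nat) : Int :=
  ((PySem.List.pyRange 1 (code.length : Int) 1).filter
      (fun q => decide (PySem.Int.mod (PySem.Int.floordiv q ((2 : Int) ^ j)) 2 = 1))).foldl
    (fun s q => PySem.Int.bxor s (PySem.List.pyGetD code q 0)) 0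

-- canonical syndrome assembly from G, over bits 0..N-1
def Canon (code : List Int) (k : Int) (N : Nat) : Int :=
  (List.range N).foldl (fun syn (j : Nat) =>
    if ((j : Int) < k ∧ G code j ≠ 0) then PySem.Int.bor syn ((2 : Int) ^ j) else syn) 0

lemma foldl_id {α β : Type} (f : β → α → β) (l : List α)
    (h : ∀ x ∈ l, ∀ s, f s x = s) : ∀ s, l.foldl f s = s := by
  induction l with
  | nil => intro s; rfl
  | cons x xs ih =>
      intro s
      rw [List.foldl_cons, h x (by simp), ih (fun y hy s => h y (by simp [hy]) s)]

lemma pred_false_of_lt (j : Nat) (q : Int) (h0 : 0 ≤ q) (h : q < (2 : Int) ^ j) :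
    ¬ PySem.Int.mod (PySem.Int.floordiv q ((2 : Int) ^ j)) 2 = 1 := by
  have hp : (0 : Int) < (2 : Int) ^ j := by positivity
  rw [PySem.Int.floordiv_eq_ediv_of_pos hp, Int.ediv_eq_zero_of_lt h0 h,
    PySem.Int.mod_eq_emod_of_pos (by norm_num)]
  decide

lemma G_eq_zero (code : List Int) (j : Nat) (h : (code.length : Int) ≤ (2 : Int) ^ j) :
    G code j = 0 := by
  unfold G
  rw [List.filter_eq_nil_iff.mpr ?_]
  · rfl
  intro q hq
  rw [PySem.List.mem_pyRange_one] at hq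
  simpa using pred_false_of_lt j q (by omega) (by omega)

-- the stride-block walk of A computes the filtered XOR over [i, n]
lemma pyWhileA_eq (code : List Int) (n p : Int) (hp : 0 < p) (i s : Int) :
    0 < i → PySem.Int.mod i (2 * p) = p →
    pyWhileA code n p hp i s =
      ((PySem.List.pyRange i (n + 1) 1).filter
          (fun q => decide (PySem.Int.mod (PySem.Int.floordiv q p) 2 = 1))).foldl
        (fun s q => PySem.Int.bxor s (PySem.List.pyGetD code q 0)) s := by
  fun_induction pyWhileA code n p hp i s with
  | case1 i s h IH =>
      intro hipos hi
      have h2p : (0 : Int) < 2 * p := by omega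
      rw [PySem.Int.mod_eq_emod_of_pos h2p] at hi
      set t := i / (2 * p) with htdef
      have ht : i = 2 * p * t + p := by
        have h1 := Int.ediv_add_emod i (2 * p)
        rw [← htdef] at h1
        linarith
      have ht0 : 0 ≤ t := by
        by_contra hneg
        rw [not_le] at hneg
        have h2 := mul_le_mul_of_nonneg_left (show t ≤ -1 by omega) (show (0:Int) ≤ 2 * p by omega)
        rw [mul_neg_one] at h2
        rw [ht] at hipos
        linarith
      rw [IH (by omega) (by
        rw [PySem.Int.mod_eq_emod_of_pos h2p]
        have h3 := Int.add_mul_emod_self_left (a := i) (b := 2 * p) (c := 1)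
        simp only [mul_one] at h3
        omega)]
      -- split [i, n+1) at min(i+p, n+1) and min(i+2p, n+1)
      rw [PySem.List.pyRange_one_append i (min (i + p) (n + 1)) (n + 1) (by omega) (by omega),
        PySem.List.pyRange_one_append (min (i + p) (n + 1)) (min (i + 2 * p) (n + 1)) (n + 1)
          (by omega) (by omega), List.filter_append, List.filter_append, List.foldl_append,
        List.foldl_append]
      -- first block: every q has (q // p) odd
      have hblk1 : (PySem.List.pyRange i (min (i + p) (n + 1)) 1).filter
          (fun q => decide (PySem.Int.mod (PySem.Int.floordiv q p) 2 = 1))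
          = PySem.List.pyRange i (min (i + p) (n + 1)) 1 := by
        apply List.filter_eq_self.mpr
        intro q hq
        rw [PySem.List.mem_pyRange_one] at hq
        have hq1 : q = (q - i) + (2 * t + 1) * p := by rw [ht]; ring_nf
        have hdiv : PySem.Int.floordiv q p = 2 * t + 1 := by
          rw [PySem.Int.floordiv_eq_ediv_of_pos hp, hq1,
            Int.add_mul_ediv_right _ _ (ne_of_gt hp),
            Int.ediv_eq_zero_of_lt (by omega) (by omega)]
          ring
        rw [hdiv, PySem.Int.mod_eq_emod_of_pos (by norm_num)]
        simp only [decide_eq_true_eq]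
        omega
      -- second block: every q has (q // p) even
      have hblk2 : (PySem.List.pyRange (min (i + p) (n + 1)) (min (i + 2 * p) (n + 1)) 1).filter
          (fun q => decide (PySem.Int.mod (PySem.Int.floordiv q p) 2 = 1)) = [] := by
        apply List.filter_eq_nil_iff.mpr
        intro q hq
        rw [PySem.List.mem_pyRange_one] at hq
        have hq1 : q = (q - i - p) + (2 * t + 2) * p := by rw [ht]; ring_nf
        have hdiv : PySem.Int.floordiv q p = 2 * t + 2 := by
          rw [PySem.Int.floordiv_eq_ediv_of_pos hp, hq1,
            Int.add_mul_ediv_right _ _ (ne_of_gt hp),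
            Int.ediv_eq_zero_of_lt (by omega) (by omega)]
          ring
        rw [hdiv, PySem.Int.mod_eq_emod_of_pos (by norm_num)]
        simp only [decide_eq_true_eq]
        omega
      rw [hblk1, hblk2]
      by_cases hle : i + 2 * p ≤ n + 1
      · rw [min_eq_left hle]
        simp
      · rw [PySem.List.pyRange_one_eq_nil (a := i + 2 * p) (b := n + 1) (by omega),
          PySem.List.pyRange_one_eq_nil (a := min (i + 2 * p) (n + 1)) (b := n + 1) (by omega)]
        simp
  | case2 i s h =>
      intro _ _
      rw [PySem.List.pyRange_one_eq_nil (by omega)]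
      rfl

-- A computes Canon over bits 0..k-1
lemma A_eq (code : List Int) (k : Int) :
    syndrome_of_codeword code k = Canon code k k.toNat := by
  unfold syndrome_of_codeword Canon
  rw [PySem.List.pyRange_one, List.foldl_map]
  simp only [sub_zero, zero_add, Int.toNat_natCast]
  apply PySem.List.foldl_congr_mem'
  intro j hj syn
  rw [List.mem_range] at hj
  have hjk : (j : Int) < k := by omega
  have hp : (0 : Int) < (2 : Int) ^ j := by positivity
  by_cases hle : (2 : Int) ^ j ≤ (code.length : Int) - 1
  · -- the walk runs; relate it to G
    rw [pyWhileA_eq code ((code.length : Int) - 1) ((2 : Int) ^ j) _ ((2 : Int) ^ j) 0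
        (by positivity)
        (by rw [PySem.Int.mod_eq_emod_of_pos (by omega)]
            exact Int.emod_eq_of_lt (by positivity) (by omega))]
    have hG : G code j = ((PySem.List.pyRange ((2 : Int) ^ j) ((code.length : Int) - 1 + 1) 1).filter
        (fun q => decide (PySem.Int.mod (PySem.Int.floordiv q ((2 : Int) ^ j)) 2 = 1))).foldl
          (fun s q => PySem.Int.bxor s (PySem.List.pyGetD code q 0)) 0 := by
      unfold G
      rw [show ((code.length : Int) - 1 + 1) = (code.length : Int) by ring]
      rw [PySem.List.pyRange_one_append 1 ((2 : Int) ^ j) (code.length : Int) (by omega) (by omega),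
        List.filter_append, List.foldl_append]
      rw [List.filter_eq_nil_iff.mpr ?_]
      · rfl
      intro q hq
      rw [PySem.List.mem_pyRange_one] at hq
      simpa using pred_false_of_lt j q (by omega) (by omega)
    rw [← hG]
    simp [hjk]
  · -- the walk never starts and G is 0
    rw [pyWhileA.eq_def, dif_neg (by omega)]
    rw [G_eq_zero code j (by omega)]
    simp

lemma innerB_length (k i c : Int) (m : Nat) (acc : List Int) :
    (innerB k i c m acc).length = acc.length := by
  unfold innerB
  generalize List.range m = l
  induction l generalizing acc with
  | nil => rfl
  | cons x xs ih =>
      rw [List.foldl_cons, ih]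
      split <;> simp

lemma innerB_succ (k i c : Int) (M : Nat) (acc : List Int) :
    innerB k i c (M + 1) acc =
      (if ((M : Int) < k ∧ PySem.Int.mod (PySem.Int.floordiv i ((2 : Int) ^ M)) 2 = 1)
       then (innerB k i c M acc).set M (PySem.Int.bxor ((innerB k i c M acc).getD M 0) c)
       else innerB k i c M acc) := by
  unfold innerB
  rw [List.range_succ, List.foldl_append, List.foldl_cons, List.foldl_nil]

lemma innerB_getD_ge (k i c : Int) (m : Nat) (acc : List Int) (j : Nat) (hj : m ≤ j) :
    (innerB k i c m acc).getD j 0 = acc.getD j 0 := by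
  induction m with
  | zero => rfl
  | succ M ih =>
      rw [innerB_succ]
      split
      · rw [List.getD_eq_getElem?_getD, List.getElem?_set_ne (by omega),
          ← List.getD_eq_getElem?_getD, ih (by omega)]
      · exact ih (by omega)

lemma innerB_getD_lt (k i c : Int) (m : Nat) (acc : List Int) (j : Nat) (hj : j < m)
    (hlen : m ≤ acc.length) :
    (innerB k i c m acc).getD j 0 =
      if ((j : Int) < k ∧ PySem.Int.mod (PySem.Int.floordiv i ((2 : Int) ^ j)) 2 = 1)
      then PySem.Int.bxor (acc.getD j 0) c else acc.getD j 0 := by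
  induction m with
  | zero => omega
  | succ M ih =>
      rw [innerB_succ]
      rcases Nat.lt_or_ge j M with hjM | hjM
      · split
        · rw [List.getD_eq_getElem?_getD, List.getElem?_set_ne (by omega),
            ← List.getD_eq_getElem?_getD, ih hjM (by omega)]
        · exact ih hjM (by omega)
      · have hjeq : j = M := by omega
        subst hjeq
        have hX : (innerB k i c j acc).getD j 0 = acc.getD j 0 :=
          innerB_getD_ge k i c j acc j le_rfl
        have hXlen : (innerB k i c j acc).length = acc.length := innerB_length k i c j acc
        split
        · rw [List.getD_eq_getElem?_getD, List.getElem?_set_self (by omega), ← hX]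
          rfl
        · exact hX

lemma outer_getD (k : Int) (g : Int → Int) (M : Nat) (j : Nat) (hj : j < M)
    (l : List Int) :
    ∀ (acc : List Int), M ≤ acc.length →
    ((l.foldl (fun acc i => innerB k i (g i) M acc) acc).getD j 0)
      = l.foldl (fun s i =>
          if ((j : Int) < k ∧ PySem.Int.mod (PySem.Int.floordiv i ((2 : Int) ^ j)) 2 = 1)
          then PySem.Int.bxor s (g i) else s) (acc.getD j 0) := by
  induction l with
  | nil => intro acc _; rfl
  | cons i l ih =>
      intro acc hacc
      rw [List.foldl_cons, List.foldl_cons,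
        ih (innerB k i (g i) M acc) (by rw [innerB_length]; exact hacc),
        innerB_getD_lt k i (g i) M acc j hj hacc]

lemma bitLenLoop_spec (n : Int) (p : Int) (hp : 0 < p) (m : Nat) :
    n < p * 2 ^ (bitLenLoop n p hp m - m) ∧ m ≤ bitLenLoop n p hp m := by
  fun_induction bitLenLoop n p hp m with
  | case1 p hp m h IH =>
      rcases IH with ⟨h1, h2⟩
      constructor
      · have he : bitLenLoop n (p * 2) (by omega) (m + 1) - m
            = (bitLenLoop n (p * 2) (by omega) (m + 1) - (m + 1)) + 1 := by omega
        rw [he, pow_succ]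
        nlinarith
      · omega
  | case2 p hp m h =>
      simp only [Nat.sub_self, pow_zero, mul_one]
      omega

lemma bitLen_spec (n : Int) : n < 2 ^ bitLen n := by
  have h := bitLenLoop_spec n 1 (by omega) 0
  unfold bitLen
  simpa using h.1

-- B computes Canon over bits 0..m-1
lemma B_eq (code : List Int) (k : Int) :
    syndrome_of_codeword_alt code k
      = Canon code k (bitLen ((code.length : Int) - 1)) := by
  unfold syndrome_of_codeword_alt Canon
  apply PySem.List.foldl_congr_mem'
  intro j hj syn
  rw [List.mem_range] at hj
  rw [outer_getD k _ _ j hj _ (List.replicate (bitLen ((code.length : Int) - 1)) 0) (by simp)]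
  rw [List.getD_eq_getElem?_getD, List.getElem?_replicate, if_pos hj, Option.getD_some]
  by_cases hk : (j : Int) < k
  · have hfold : (PySem.List.pyRange 1 ((code.length : Int) - 1 + 1) 1).foldl (fun s i =>
        if ((j : Int) < k ∧ PySem.Int.mod (PySem.Int.floordiv i ((2 : Int) ^ j)) 2 = 1)
        then PySem.Int.bxor s (PySem.List.pyGetD code i 0) else s) (0 : Int)
        = G code j := by
      rw [show ((code.length : Int) - 1 + 1) = (code.length : Int) by ring]
      unfold G
      rw [PySem.List.foldl_ite_eq_foldl_filter]
      congr 1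
      apply List.filter_congr
      intro q _
      simp [hk]
    rw [hfold]
    simp [hk]
  · have hfold : (PySem.List.pyRange 1 ((code.length : Int) - 1 + 1) 1).foldl (fun s i =>
        if ((j : Int) < k ∧ PySem.Int.mod (PySem.Int.floordiv i ((2 : Int) ^ j)) 2 = 1)
        then PySem.Int.bxor s (PySem.List.pyGetD code i 0) else s) (0 : Int)
        = 0 := by
      apply foldl_id
      intro x _ s
      rw [if_neg (by tauto)]
    rw [hfold]
    simp [hk]

lemma Canon_pad (code : List Int) (k : Int) (N b : Nat)
    (hz : ∀ j : Nat, N ≤ j → j < N + b → ¬ ((j : Int) < k ∧ G code j ≠ 0)) :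
    Canon code k (N + b) = Canon code k N := by
  unfold Canon
  rw [List.range_add, List.foldl_append]
  apply foldl_id
  intro x hx s
  rw [List.mem_map] at hx
  rcases hx with ⟨u, hu, rfl⟩
  rw [List.mem_range] at hu
  rw [if_neg (hz (N + u) (by omega) (by omega))]

-- ===== VERDICT (by name: the statement is the Claim_ definition above) =====
theorem syndrome_of_codeword_spec : Claim_equal_syndrome_of_codeword := by
  intro code k _
  unfold Spec_syndrome_of_codeword
  rw [A_eq, B_eq]
  have hnm : (code.length : Int) - 1 < 2 ^ bitLen ((code.length : Int) - 1) :=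
    bitLen_spec ((code.length : Int) - 1)
  rcases Nat.le_total k.toNat (bitLen ((code.length : Int) - 1)) with hle | hle
  · rw [show bitLen ((code.length : Int) - 1) = k.toNat + (bitLen ((code.length : Int) - 1) - k.toNat) from by omega,
      Canon_pad code k k.toNat _ (fun j hj _ hc => by
        have : (j : Int) < k := hc.1
        omega)]
  · rw [show k.toNat = bitLen ((code.length : Int) - 1) + (k.toNat - bitLen ((code.length : Int) - 1)) from by omega,
      Canon_pad code k (bitLen ((code.length : Int) - 1)) _ (fun j hj _ hc => by
        apply hc.2
        apply G_eq_zero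
        have h2 : (2 : Int) ^ bitLen ((code.length : Int) - 1) ≤ (2 : Int) ^ j :=
          pow_le_pow_right₀ (by norm_num) hj
        omega)]
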